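-- pv_equiv track=rewrite | github.com/Markliu225/ebpf-cupti | src/xpu/flamegraph/align_kernel_metrics.py | _collapse_chunks
-- ===== SOURCE A (Python) =====
-- from typing import Dict, Iterable, List, Sequence
--
-- def _collapse_chunks(lines: Iterable[str]) -> Iterable[List[str]]:
--     chunk: List[str] = []
--     for line in lines:
--         stripped = line.rstrip("\n")
--         if stripped:
--             chunk.append(stripped)
--             continue
--         if chunk:
--             yield chunk
--             chunk = []
--     if chunk:
--         yield chunk
-- ===== SOURCE B (Python) =====
-- from itertools import groupby
--
--
-- def _collapse_chunks(lines):
--     stripped = (line.rstrip("\n") for line in lines)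
--     for key, group in groupby(stripped, key=bool):
--         if key:
--             yield list(group)
-- ===== Notes on version B (the rewrite author's own statement) =====
-- stated objective: idiomatic
-- what changed: Replaced the manual chunk accumulator with two flush sites by a single itertools.groupby pass over the stripped lines, yielding only the truthy groups.
import Mathlib
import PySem

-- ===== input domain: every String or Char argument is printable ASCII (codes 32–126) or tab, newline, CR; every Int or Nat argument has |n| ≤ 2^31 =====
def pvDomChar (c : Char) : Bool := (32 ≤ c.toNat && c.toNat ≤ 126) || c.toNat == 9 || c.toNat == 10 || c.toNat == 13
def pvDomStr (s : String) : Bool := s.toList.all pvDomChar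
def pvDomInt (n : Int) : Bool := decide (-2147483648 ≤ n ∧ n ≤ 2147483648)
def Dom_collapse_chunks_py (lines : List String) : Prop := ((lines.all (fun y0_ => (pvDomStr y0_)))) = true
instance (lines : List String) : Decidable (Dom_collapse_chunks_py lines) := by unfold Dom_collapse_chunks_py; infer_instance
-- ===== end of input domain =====

-- B replaces A's manual chunk accumulator (with its two flush sites) by one grouping pass that keeps the non-blank runs; objective: idiomatic.

-- ===== PORT A =====
-- line.rstrip("\n"): drop trailing '\n' characters (exact: only the character '\n' is stripped)
def pvRstripNL (s : String) : String :=
  String.ofList ((s.toList.reverse.dropWhile (fun c => c == '\n')).reverse)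

-- A's loop: `chunk` accumulator, flushed on a blank stripped line and once at the end
def collapse_chunks_py_go : List String → List String → List (List String)
  | [], chunk => if chunk ≠ [] then [chunk] else []
  | line :: rest, chunk =>
      let stripped := pvRstripNL line
      if stripped ≠ "" then
        collapse_chunks_py_go rest (chunk ++ [stripped])
      else if chunk ≠ [] then
        chunk :: collapse_chunks_py_go rest []
      else
        collapse_chunks_py_go rest []

def collapse_chunks_py (lines : List String) : List (List String) :=
  collapse_chunks_py_go lines []

-- ===== PORT B =====
-- groupby(stripped, key=bool), keeping only the truthy groups: a non-blank run is one group
def collapse_chunks_py_groups : List String → List (List String)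
  | [] => []
  | s :: rest =>
      if s = "" then collapse_chunks_py_groups rest
      else (s :: rest.takeWhile (fun t => t ≠ "")) ::
           collapse_chunks_py_groups (rest.dropWhile (fun t => t ≠ ""))
  termination_by l => l.length
  decreasing_by
    all_goals have := List.length_dropWhile_le (p := fun t => decide (t ≠ "")) (l := rest)
    all_goals simp at this ⊢ <;> omega

def collapse_chunks_py_alt (lines : List String) : List (List String) :=
  collapse_chunks_py_groups (lines.map pvRstripNL)

-- ===== PRECONDITION & SPEC =====
def Spec_collapse_chunks_py (lines : List String) (out : List (List String)) : Prop := out = collapse_chunks_py_alt lines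
instance (lines : List String) (out : List (List String)) : Decidable (Spec_collapse_chunks_py lines out) := by unfold Spec_collapse_chunks_py; infer_instance

-- ===== CLAIM (what is proved, stated in full; the proofs are below) =====
def Claim_equal_collapse_chunks_py : Prop := ∀ (lines : List String), Dom_collapse_chunks_py lines → Spec_collapse_chunks_py lines (collapse_chunks_py lines)

-- ===== LEMMAS AND PROOFS =====

-- A's loop on an already-stripped list (so that both sides talk about the same list)
def pvGoS : List String → List String → List (List String)
  | [], chunk => if chunk ≠ [] then [chunk] else []
  | s :: rest, chunk =>
      if s ≠ "" then pvGoS rest (chunk ++ [s])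
      else if chunk ≠ [] then chunk :: pvGoS rest []
      else pvGoS rest []

theorem pvGo_eq_goS (lines : List String) (chunk : List String) :
    collapse_chunks_py_go lines chunk = pvGoS (lines.map pvRstripNL) chunk := by
  induction lines generalizing chunk with
  | nil => rfl
  | cons l rest ih =>
      simp only [collapse_chunks_py_go, List.map, pvGoS]
      split_ifs <;> simp [ih]

-- combined invariant: empty accumulator gives the groups; a nonempty accumulator
-- absorbs the leading non-blank run and then proceeds like the groups
theorem pvGoS_inv (ss : List String) :
    pvGoS ss [] = collapse_chunks_py_groups ss ∧
    (∀ chunk : List String, chunk ≠ [] →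
      pvGoS ss chunk =
        (chunk ++ ss.takeWhile (fun t => t ≠ "")) ::
          collapse_chunks_py_groups (ss.dropWhile (fun t => t ≠ ""))) := by
  induction ss with
  | nil =>
      refine ⟨by simp [pvGoS, collapse_chunks_py_groups], fun chunk h => ?_⟩
      simp [pvGoS, collapse_chunks_py_groups, h]
  | cons s rest ih =>
      by_cases hs : s = ""
      · subst hs
        refine ⟨?_, fun chunk h => ?_⟩
        · simp [pvGoS, collapse_chunks_py_groups, ih.1]
        · simp [pvGoS, collapse_chunks_py_groups, h, List.takeWhile, List.dropWhile, ih.1]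
      · refine ⟨?_, fun chunk h => ?_⟩
        · simp only [pvGoS, if_pos hs]
          simp only [List.nil_append]
          rw [(ih.2 [s] (by simp)), collapse_chunks_py_groups]
          simp [hs]
        · simp only [pvGoS, if_pos hs]
          rw [ih.2 (chunk ++ [s]) (by simp)]
          simp [hs, List.takeWhile, List.dropWhile]

-- ===== VERDICT (by name: the statement is the Claim_ definition above) =====
theorem collapse_chunks_py_spec : Claim_equal_collapse_chunks_py := by
  intro lines _
  unfold Spec_collapse_chunks_py collapse_chunks_py collapse_chunks_py_alt
  rw [pvGo_eq_goS]
  exact (pvGoS_inv _).1
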